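-- pv_equiv track=rewrite | github.com/onticabo/learning | B037:【2017年お正月問題】幸運な1年.py | isLuckyDay
-- ===== SOURCE A (Python) =====
-- def MDtoDate(month, day):
--     return(('0' + month)[-2:] + ('0' + day)[-2:])
--
-- def isLuckyDay(m, d, w, x, y, z):
--     date = MDtoDate(m, d)
--     cards = [str(i % 10) for i in [w, x, y, z]]
--     for c in date:
--         if c in cards:
--             cards.remove(c)
--         else:
--             return False
--     return True
-- ===== SOURCE B (Python) =====
-- def isLuckyDay(m, d, w, x, y, z):
--     date = ('0' + m)[-2:] + ('0' + d)[-2:]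
--     cards = [str(i % 10) for i in [w, x, y, z]]
--     ds = list(date)
--     return all(ds.count(c) <= cards.count(c) for c in ds)
-- ===== Notes on version B (the rewrite author's own statement) =====
-- stated objective: simpler
-- what changed: The greedy consume-and-remove loop with early return is replaced by a single multiset-inclusion test: every date digit must occur in the date at most as often as among the cards (count comparison, no mutation, no branching).
import Mathlib
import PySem

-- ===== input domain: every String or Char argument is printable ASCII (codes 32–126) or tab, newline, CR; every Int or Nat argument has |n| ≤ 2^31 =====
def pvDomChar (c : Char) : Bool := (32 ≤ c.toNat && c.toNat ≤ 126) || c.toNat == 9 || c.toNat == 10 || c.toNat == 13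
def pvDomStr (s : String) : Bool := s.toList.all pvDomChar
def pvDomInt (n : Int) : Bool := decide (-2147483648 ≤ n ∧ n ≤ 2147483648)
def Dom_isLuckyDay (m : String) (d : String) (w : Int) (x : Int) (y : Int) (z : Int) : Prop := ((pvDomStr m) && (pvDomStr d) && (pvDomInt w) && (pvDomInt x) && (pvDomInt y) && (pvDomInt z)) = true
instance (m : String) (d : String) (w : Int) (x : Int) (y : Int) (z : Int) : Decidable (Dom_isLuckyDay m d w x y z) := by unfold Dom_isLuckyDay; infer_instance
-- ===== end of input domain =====

-- B replaces A's greedy consume-and-remove loop with a direct multiset-inclusion count test (same result, no mutation or early return); objective: simpler.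


-- ===== PORT A =====
-- ('0' + month)[-2:]: one-char '+' concatenation is exact as cons on the char list; [-2:] is PySem slice
def pvMDtoDate (month : String) (day : String) : List Char :=
  PySem.List.slice ('0' :: month.toList) (some (-2)) none ++
    PySem.List.slice ('0' :: day.toList) (some (-2)) none

-- a one-char Python string (an element of iteration over a str)
def pvChr (c : Char) : String := String.mk [c]

-- the for-loop of A: consume each date char from cards, early-return False when absent
def pvLuckyLoop : List Char → List String → Bool
  | [], _ => true
  | c :: rest, cards =>
    match PySem.List.remove? cards (pvChr c) with
    | some cards' => pvLuckyLoop rest cards'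
    | none => false

def isLuckyDay (m : String) (d : String) (w : Int) (x : Int) (y : Int) (z : Int) : Bool :=
  let date := pvMDtoDate m d
  let cards := [w, x, y, z].map (fun i => PySem.Int.toStr (PySem.Int.mod i 10))
  pvLuckyLoop date cards

-- ===== PORT B =====
def isLuckyDay_alt (m : String) (d : String) (w : Int) (x : Int) (y : Int) (z : Int) : Bool :=
  let date := PySem.List.slice ('0' :: m.toList) (some (-2)) none ++
    PySem.List.slice ('0' :: d.toList) (some (-2)) none
  let cards := [w, x, y, z].map (fun i => PySem.Int.toStr (PySem.Int.mod i 10))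
  let ds := date.map (fun c => String.mk [c])
  ds.all (fun c => PySem.List.count ds c ≤ PySem.List.count cards c)

-- ===== PRECONDITION & SPEC =====
def Spec_isLuckyDay (m : String) (d : String) (w : Int) (x : Int) (y : Int) (z : Int) (out : Bool) : Prop := out = isLuckyDay_alt m d w x y z
instance (m : String) (d : String) (w : Int) (x : Int) (y : Int) (z : Int) (out : Bool) : Decidable (Spec_isLuckyDay m d w x y z out) := by unfold Spec_isLuckyDay; infer_instance

-- ===== CLAIM (what is proved, stated in full; the proofs are below) =====
def Claim_equal_isLuckyDay : Prop := ∀ (m : String) (d : String) (w : Int) (x : Int) (y : Int) (z : Int), Dom_isLuckyDay m d w x y z → Spec_isLuckyDay m d w x y z (isLuckyDay m d w x y z)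

-- ===== LEMMAS AND PROOFS =====

-- A's greedy removal succeeds exactly when the date's chars (as 1-char strings) form a sub-multiset of cards
theorem pvLuckyLoop_iff (l : List Char) (cs : List String) :
    pvLuckyLoop l cs = true ↔ ∀ a : String, (l.map pvChr).count a ≤ cs.count a := by
  induction l generalizing cs with
  | nil => simp [pvLuckyLoop]
  | cons c rest ih =>
    by_cases hmem : pvChr c ∈ cs
    · rw [pvLuckyLoop, PySem.List.remove?_eq_some_erase _ _ hmem]
      simp only [List.map_cons]
      rw [ih]
      constructor
      · intro h a
        have := h a
        rcases eq_or_ne a (pvChr c) with rfl | hne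
        · have hpos : 0 < cs.count (pvChr c) := List.count_pos_iff.mpr hmem
          rw [List.count_erase_self] at this
          simp only [List.count_cons_self]
          omega
        · rw [List.count_erase_of_ne hne] at this
          rw [List.count_cons_of_ne hne.symm]
          exact this
      · intro h a
        have := h a
        rcases eq_or_ne a (pvChr c) with rfl | hne
        · rw [List.count_erase_self]
          rw [List.count_cons_self] at this
          omega
        · rw [List.count_erase_of_ne hne]
          rw [List.count_cons_of_ne hne.symm] at this
          exact this
    · rw [pvLuckyLoop, (PySem.List.remove?_eq_none_iff cs (pvChr c)).mpr hmem]
      apply iff_of_false (by simp)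
      intro hP
      have h0 := hP (pvChr c)
      rw [List.count_eq_zero_of_not_mem hmem] at h0
      simp only [List.map_cons, List.count_cons_self] at h0
      omega

-- B's all-counts test states the same sub-multiset condition
theorem pvAll_iff (ds cs : List String) :
    (ds.all (fun c => PySem.List.count ds c ≤ PySem.List.count cs c)) = true ↔
      ∀ a : String, ds.count a ≤ cs.count a := by
  simp only [List.all_eq_true, decide_eq_true_eq, PySem.List.count_eq]
  constructor
  · intro h a
    by_cases ha : a ∈ ds
    · exact h a ha
    · simp [List.count_eq_zero_of_not_mem ha]
  · intro h a _
    exact h a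

-- ===== VERDICT (by name: the statement is the Claim_ definition above) =====
theorem isLuckyDay_spec : Claim_equal_isLuckyDay := by
  intro m d w x y z _hdom
  unfold Spec_isLuckyDay isLuckyDay isLuckyDay_alt
  simp only [pvMDtoDate]
  rw [Bool.eq_iff_iff, pvLuckyLoop_iff, pvAll_iff]
  constructor <;> intro h a <;> simpa [pvChr] using h a
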